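-- pv_equiv track=rewrite | github.com/W-O-W/workspace | python/python/data_loader.py | search
-- ===== SOURCE A (Python) =====
-- def search(x,l):
--     start = 0
--     end = len(l)-1
--
--     while end - start > 1:
--         median1 = int((start + end) / 2)
--         median2 = median1 + 1
--         if x >= l[median1] and x < l[median2]:
--             start = median1
--             end = median2
--         elif x >= l[median2]:
--             start = median2
--         elif x < l[median1]:
--             end = median1
--     return str.format("{0}:{1}",l[start],l[end])
-- ===== SOURCE B (Python) =====
-- def search(x, l):
--     # Recursive slicing binary search: the bracketing pair keeps the same
--     # relative position inside each slice, so no start/end indices are needed.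
--     n = len(l)
--     if n <= 2:
--         return "{0}:{1}".format(l[0], l[-1])
--     m = (n - 1) // 2
--     if x >= l[m] and x < l[m + 1]:
--         return "{0}:{1}".format(l[m], l[m + 1])
--     elif x >= l[m + 1]:
--         return search(x, l[m + 1:])
--     else:
--         return search(x, l[:m + 1])
-- ===== Notes on version B (the rewrite author's own statement) =====
-- stated objective: alternative
-- what changed: The iterative while-loop over explicit start/end indices is replaced by a recursive binary search on list slices: the bracketing pair keeps the same relative position inside each slice, so no index state is carried at all.
import Mathlib
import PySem

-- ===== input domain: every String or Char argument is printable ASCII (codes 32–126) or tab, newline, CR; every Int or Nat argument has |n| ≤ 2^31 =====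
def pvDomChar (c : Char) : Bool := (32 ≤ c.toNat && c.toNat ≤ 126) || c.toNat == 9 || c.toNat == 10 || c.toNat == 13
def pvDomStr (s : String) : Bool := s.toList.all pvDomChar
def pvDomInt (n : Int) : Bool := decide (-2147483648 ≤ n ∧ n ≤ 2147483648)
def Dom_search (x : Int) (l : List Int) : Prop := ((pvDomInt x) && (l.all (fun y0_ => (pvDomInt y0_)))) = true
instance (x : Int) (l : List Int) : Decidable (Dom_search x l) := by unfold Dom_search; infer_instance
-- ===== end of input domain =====

-- B is a recursive slicing binary search (no start/end index state); same return value as A on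
-- every non-empty list (the only mutation-free corner, the empty list, raises IndexError in both).

-- str.format("{0}:{1}", a, b)
def pvFmt (a b : Int) : String := PySem.Int.toStr a ++ ":" ++ PySem.Int.toStr b

-- ===== PORT A =====
-- the while loop: returns the final (start, end) pair.
-- int((start+end)/2): float truncation; on every state the loop reaches start+end ≥ 0, where
-- truncation = floor, so PySem.Int.floordiv is exact there.
-- list indexing l[i] uses pyGet? with .getD 0; inside the loop the indices are always in range.
-- the final 'else' corresponds to the third 'elif x < l[median1]', whose guard provably holds there
-- (otherwise the Python loop would not terminate, which cannot happen).
def searchGo (x : Int) (l : List Int) (s e : Int) : Int × Int :=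
  if _h : e - s > 1 then
    let m1 := PySem.Int.floordiv (s + e) 2
    let m2 := m1 + 1
    let v1 := (PySem.List.pyGet? l m1).getD 0
    let v2 := (PySem.List.pyGet? l m2).getD 0
    if x ≥ v1 ∧ x < v2 then (m1, m2)
    else if x ≥ v2 then searchGo x l m2 e
    else searchGo x l s m1
  else (s, e)
termination_by (e - s).toNat
decreasing_by
  · have h1 : (s + 1) ≤ PySem.Int.floordiv (s + e) 2 :=
      (PySem.Int.le_floordiv_iff_mul_le (by omega)).mpr (by omega)
    have h2 : PySem.Int.floordiv (s + e) 2 < e :=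
      (PySem.Int.floordiv_lt_iff_lt_mul (by omega)).mpr (by omega)
    omega
  · have h1 : (s + 1) ≤ PySem.Int.floordiv (s + e) 2 :=
      (PySem.Int.le_floordiv_iff_mul_le (by omega)).mpr (by omega)
    have h2 : PySem.Int.floordiv (s + e) 2 < e :=
      (PySem.Int.floordiv_lt_iff_lt_mul (by omega)).mpr (by omega)
    omega

def search (x : Int) (l : List Int) : String :=
  let p := searchGo x l 0 ((l.length : Int) - 1)
  pvFmt ((PySem.List.pyGet? l p.1).getD 0) ((PySem.List.pyGet? l p.2).getD 0)

-- ===== PORT B =====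
-- recursive slicing binary search, transliteration of Source B
def search_alt (x : Int) (l : List Int) : String :=
  let n := l.length
  if _h : n ≤ 2 then
    pvFmt ((PySem.List.pyGet? l 0).getD 0) ((PySem.List.pyGet? l (-1)).getD 0)
  else
    let m := (n - 1) / 2
    let v1 := (PySem.List.pyGet? l (m : Int)).getD 0
    let v2 := (PySem.List.pyGet? l ((m : Int) + 1)).getD 0
    if x ≥ v1 ∧ x < v2 then pvFmt v1 v2
    else if x ≥ v2 then search_alt x (PySem.List.slice l (some ((m : Int) + 1)) none)  -- l[m+1:]
    else search_alt x (PySem.List.slice l none (some ((m : Int) + 1)))                -- l[:m+1]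
termination_by l.length
decreasing_by
  · have : PySem.List.slice l (some ((((l.length - 1) / 2 : Nat)) + 1 : Int)) none
        = l.drop ((l.length - 1) / 2 + 1) := by
      have := PySem.List.slice_from_natCast (xs := l) (a := (l.length - 1) / 2 + 1)
      simpa using this
    rw [this]
    simp only [List.length_drop]
    omega
  · have : PySem.List.slice l none (some ((((l.length - 1) / 2 : Nat)) + 1 : Int))
        = l.take ((l.length - 1) / 2 + 1) := by
      have := PySem.List.slice_to_natCast (xs := l) (b := (l.length - 1) / 2 + 1)
      simpa using this
    rw [this]
    simp only [List.length_take]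
    omega

-- ===== PRECONDITION & SPEC =====
-- Pre_ excludes the empty list, on which both A and B raise IndexError.
def Pre_search (x : Int) (l : List Int) : Prop := l ≠ []
instance (x : Int) (l : List Int) : Decidable (Pre_search x l) := by unfold Pre_search; infer_instance
def pvWitness_search : Int × List Int := (1, [0, 2, 5])

def Spec_search (x : Int) (l : List Int) (out : String) : Prop := out = search_alt x l
instance (x : Int) (l : List Int) (out : String) : Decidable (Spec_search x l out) := by unfold Spec_search; infer_instance

-- ===== CLAIM (what is proved, stated in full; the proofs are below) =====
def Claim_equal_search : Prop := ∀ (x : Int) (l : List Int), Dom_search x l → Pre_search x l → Spec_search x l (search x l)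

-- ===== LEMMAS AND PROOFS =====

lemma go_eq (x : Int) (l : List Int) (k s e : Nat) (hk : e - s = k) (hse : s ≤ e) (he : e < l.length) :
    pvFmt ((PySem.List.pyGet? l (searchGo x l (s : Int) (e : Int)).1).getD 0)
        ((PySem.List.pyGet? l (searchGo x l (s : Int) (e : Int)).2).getD 0)
      = search_alt x ((l.take (e + 1)).drop s) := by
  induction k using Nat.strong_induction_on generalizing s e with
  | _ k IH =>
  subst hk
  have hsublen : ((l.take (e + 1)).drop s).length = e + 1 - s := by
    simp [List.length_drop, List.length_take]; omega
  by_cases hgap : ((e : Int) - (s : Int) > 1)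
  · -- loop iterates
    have hgap' : s + 2 ≤ e := by omega
    -- the midpoint as a Nat
    set sn : Nat := s + (e - s) / 2 with hsn
    have hmid : PySem.Int.floordiv ((s : Int) + (e : Int)) 2 = ((sn : Nat) : Int) := by
      have hcast : (s : Int) + (e : Int) = (((s + e : Nat) : Int)) := by push_cast; ring
      rw [hcast, show (2:Int) = ((2:Nat):Int) from rfl, PySem.Int.floordiv_natCast]
      exact congrArg Nat.cast (by omega)
    have hsn_lt : sn < e := by omega
    have hsn_ge : s < sn := by omega
    set sub := (l.take (e + 1)).drop s with hsub
    have hget : ∀ j : Nat, j ≤ e - s → sub[j]? = l[s + j]? := by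
      intro j hj
      rw [hsub, List.getElem?_drop, List.getElem?_take_of_lt (by omega)]
    have hn2 : ¬ (sub.length ≤ 2) := by omega
    set mm : Nat := (e - s) / 2 with hmm
    have hm : (sub.length - 1) / 2 = mm := by omega
    have hc1 : ((mm : Nat) : Int) + 1 = ((mm + 1 : Nat) : Int) := by push_cast; ring
    have hc2 : ((sn : Nat) : Int) + 1 = ((sn + 1 : Nat) : Int) := by push_cast; ring
    have hbv1 : PySem.List.pyGet? sub ((mm : Nat) : Int) = l[sn]? := by
      rw [PySem.List.pyGet?_natCast, hget mm (by omega)]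
    have hbv2 : PySem.List.pyGet? sub (((mm : Nat) : Int) + 1) = l[sn + 1]? := by
      rw [hc1, PySem.List.pyGet?_natCast, hget (mm + 1) (by omega)]
      have hix : s + (mm + 1) = sn + 1 := by omega
      rw [hix]
    rw [searchGo, search_alt]
    simp only [dif_pos hgap, dif_neg hn2, hmid, hm, hbv1, hbv2, hc2,
      PySem.List.pyGet?_natCast]
    split_ifs with hb1 hb2
    · simp only [PySem.List.pyGet?_natCast]
    · have hIH := IH (e - (sn + 1)) (by omega) (sn + 1) e rfl (by omega) he
      rw [hIH]
      congr 1
      rw [hc1, PySem.List.slice_from_natCast, hsub, List.drop_drop,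
        show s + (mm + 1) = sn + 1 from by omega]
    · have hIH := IH (sn - s) (by omega) s sn rfl (by omega) (by omega)
      rw [hIH]
      congr 1
      rw [hc1, PySem.List.slice_to_natCast, hsub, List.drop_take, List.drop_take,
        List.take_take]
      congr 1
      omega
  · -- loop exits: e - s ≤ 1
    rw [searchGo, search_alt]
    simp only [hgap, hsublen]
    have hn2 : e + 1 - s ≤ 2 := by omega
    simp only [dif_pos hn2]
    have h0 : PySem.List.pyGet? ((l.take (e + 1)).drop s) 0 = l[s]? := by
      rw [PySem.List.pyGet?_zero, List.getElem?_drop, List.getElem?_take_of_lt (by omega)]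
      simp
    have h1 : PySem.List.pyGet? ((l.take (e + 1)).drop s) (-1) = l[e]? := by
      rw [PySem.List.pyGet?_neg_one, List.getLast?_eq_getElem?, hsublen,
        List.getElem?_drop, List.getElem?_take_of_lt (by omega)]
      congr 1
      omega
    rw [h0, h1]
    simp [PySem.List.pyGet?_natCast]

-- ===== VERDICT (by name: the statement is the Claim_ definition above) =====
theorem search_spec : Claim_equal_search := by
  intro x l _hd hpre
  have hlen : 0 < l.length := List.length_pos_iff.mpr hpre
  have h := go_eq x l (l.length - 1) 0 (l.length - 1) rfl (by omega) (by omega)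
  unfold Spec_search search
  have hcast : ((l.length : Int) - 1) = ((l.length - 1 : Nat) : Int) := by omega
  rw [hcast]
  have hl : (l.take (l.length - 1 + 1)).drop 0 = l := by
    simp [Nat.sub_add_cancel hlen]
  rw [hl] at h
  simpa using h
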